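-- pv_equiv track=rewrite | github.com/KeyTall/full-house | Interperting Video Data.py | get_highest_stat_vids
-- ===== SOURCE A (Python) =====
-- from typing import List, Tuple, Dict, TextIO
--
-- INPUT_TRENDING_DT   = 1
--
-- Date = Tuple[int, int, int]
--
-- VideoStats = Tuple[Date, int, int, int]
--
-- def get_recent(new_date: Date, current_date: Date) -> bool or str:
--     '''
--     Determins if new_date is the more recent date compared to current_date.
--     Returns True, False, or 'both'
--
--     Precondition: new_date and current_date must not be empty tuples
--
--     >>> get_recent((10, 2, 3), (10, 2, 4))
--     False
--     >>> get_recent((12, 2, 3), (10, 2, 4))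
--     True
--     >>> get_recent((10, 2, 4), (10, 2, 4))
--     'both'
--     '''
--     new_date_recent = False
--
--     if new_date > current_date:
--         new_date_recent = True
--
--     elif new_date == current_date:
--         new_date_recent = 'both'
--
--     return new_date_recent
--
-- def get_highest_stat_vids(id_stats: Dict[str, VideoStats], chan_vids_w_term: List[str], stat_type: int) -> List[str]:
--     '''
--     looks for highest stat videos of chan_vids_w_term and returns video ids
--     as list
--
--     - id_stats: Dict[YouTube id, latest video stat]
--     '''
--
--     highest_stat_vids  = []
--
--     recent_date = (0, 0, 0)
--     max_stat = 0
--
--     #goes through each youtube id of chan_vids_w_term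
--     for youtube_id in chan_vids_w_term:
--         stats = id_stats[youtube_id]
--
--         #if stat is not date
--         if stat_type != INPUT_TRENDING_DT - 1:
--             stat = stats[stat_type]
--
--             #if stat is greater than max stat, then reset and append highest_stat_vids
--             if stat > max_stat:
--                 max_stat = stats[stat_type]
--
--                 highest_stat_vids = []
--                 highest_stat_vids.append(youtube_id)
--
--             #if stat is equal to max stat, then append highest_stat_vids
--             elif stats[stat_type] == max_stat:
--                 highest_stat_vids.append(youtube_id)
--
--         #if stat is date
--         else:
--             new_date = stats[stat_type]
--
--             #if new date is more recent than recent_date, then reset and append highest_stat_vids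
--             if get_recent(new_date, recent_date) == True:
--                 recent_date = stats[stat_type]
--
--                 highest_stat_vids = []
--                 highest_stat_vids.append(youtube_id)
--
--             #if new date is just as recent as recent_date, then append highest_stat_vids
--             elif get_recent(new_date, recent_date) == 'both':
--                 highest_stat_vids.append(youtube_id)
--
--     return highest_stat_vids
-- ===== SOURCE B (Python) =====
-- def get_highest_stat_vids(id_stats, chan_vids_w_term, stat_type):
--     '''Two-pass: compute each video's key, take the max (floored at the
--     original sentinel), then keep the ids whose key equals it, in order.'''
--     if stat_type == 0:
--         keys = [id_stats[v][0] for v in chan_vids_w_term]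
--         thr = max([(0, 0, 0)] + keys)
--     else:
--         keys = [id_stats[v][stat_type] for v in chan_vids_w_term]
--         thr = max([0] + keys)
--     return [v for v, k in zip(chan_vids_w_term, keys) if k == thr]
-- ===== Notes on version B (the rewrite author's own statement) =====
-- stated objective: simpler
-- what changed: Replaces the single running-max-with-reset loop (mutable best-list, running max/date state) by a two-pass max-then-filter decomposition: build the key list, take max floored at the original sentinel, keep ids whose key equals it.
import Mathlib
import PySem

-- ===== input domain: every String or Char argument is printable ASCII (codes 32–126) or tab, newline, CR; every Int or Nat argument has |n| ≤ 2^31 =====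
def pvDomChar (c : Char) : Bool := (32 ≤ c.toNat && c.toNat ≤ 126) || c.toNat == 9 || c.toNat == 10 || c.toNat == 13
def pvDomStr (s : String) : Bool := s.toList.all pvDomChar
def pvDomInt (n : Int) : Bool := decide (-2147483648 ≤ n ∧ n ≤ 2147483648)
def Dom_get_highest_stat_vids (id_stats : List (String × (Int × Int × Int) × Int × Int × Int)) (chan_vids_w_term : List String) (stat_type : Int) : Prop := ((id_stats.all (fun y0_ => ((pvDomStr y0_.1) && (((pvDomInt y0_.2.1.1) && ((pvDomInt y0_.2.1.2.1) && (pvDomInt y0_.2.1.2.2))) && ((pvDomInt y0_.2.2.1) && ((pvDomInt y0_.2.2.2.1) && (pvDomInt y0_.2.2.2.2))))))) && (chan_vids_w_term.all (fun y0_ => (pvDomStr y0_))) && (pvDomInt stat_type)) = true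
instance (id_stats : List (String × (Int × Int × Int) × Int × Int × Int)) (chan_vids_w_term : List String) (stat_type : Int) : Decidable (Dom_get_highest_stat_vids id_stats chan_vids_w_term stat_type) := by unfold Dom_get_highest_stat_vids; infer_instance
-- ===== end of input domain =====

-- B replaces A's single running-max-with-reset loop by a two-pass max-then-filter decomposition (simpler; same cost).

-- ===== PORT A =====
-- shared data helpers: Python tuple compare/indexing and dict lookup
-- Python's lexicographic '>' on (Int, Int, Int) triples (exact)
def pvDateGt (x y : (Int × Int × Int)) : Bool :=
  decide (x.1 > y.1) || (decide (x.1 = y.1) && (decide (x.2.1 > y.2.1) || (decide (x.2.1 = y.2.1) && decide (x.2.2 > y.2.2))))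

-- Python stats[i] on the 4-tuple (date, s1, s2, s3), int indices only: exact for i ∈ {1,2,3,-1,-2,-3};
-- i ∈ {0,-4} yields the date (not an int) and |i| ≥ 4 raises IndexError — those are outside Pre_ and return 0 here
def pvStatIdx (stats : (Int × Int × Int) × Int × Int × Int) (i : Int) : Int :=
  if i = 1 ∨ i = -3 then stats.2.1
  else if i = 2 ∨ i = -2 then stats.2.2.1
  else if i = 3 ∨ i = -1 then stats.2.2.2
  else 0

-- Python id_stats[k]: first-match lookup; a missing key raises KeyError (outside Pre_; default returned here)
def pvDGet (id_stats : List (String × (Int × Int × Int) × Int × Int × Int)) (k : String) : (Int × Int × Int) × Int × Int × Int :=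
  (PySem.Dict.mk id_stats).getD k ((0, 0, 0), 0, 0, 0)

-- A's helper get_recent: True / False / 'both'
inductive GetRecent | t | f | both
deriving DecidableEq, Repr

def get_recent (new_date current_date : Int × Int × Int) : GetRecent :=
  if pvDateGt new_date current_date then GetRecent.t
  else if new_date = current_date then GetRecent.both
  else GetRecent.f

def pvStepA (id_stats : List (String × (Int × Int × Int) × Int × Int × Int)) (stat_type : Int)
    (s : List String × (Int × Int × Int) × Int) (youtube_id : String) : List String × (Int × Int × Int) × Int :=
  let stats := pvDGet id_stats youtube_id
  if stat_type ≠ 1 - 1 then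
    let stat := pvStatIdx stats stat_type
    if s.2.2 < stat then ([youtube_id], s.2.1, pvStatIdx stats stat_type)
    else if pvStatIdx stats stat_type = s.2.2 then (s.1 ++ [youtube_id], s.2.1, s.2.2)
    else s
  else
    let new_date := stats.1
    if get_recent new_date s.2.1 = GetRecent.t then ([youtube_id], stats.1, s.2.2)
    else if get_recent new_date s.2.1 = GetRecent.both then (s.1 ++ [youtube_id], s.2.1, s.2.2)
    else s

def get_highest_stat_vids (id_stats : List (String × (Int × Int × Int) × Int × Int × Int)) (chan_vids_w_term : List String) (stat_type : Int) : List String :=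
  (chan_vids_w_term.foldl (pvStepA id_stats stat_type) ([], (0, 0, 0), 0)).1

-- ===== PORT B =====
-- Python max on ints / on date triples (first maximal element; max([sent] + keys) = foldl from sent)
def pvMaxI (a b : Int) : Int := if a < b then b else a
def pvMaxD (a b : Int × Int × Int) : Int × Int × Int := if pvDateGt b a then b else a

def get_highest_stat_vids_alt (id_stats : List (String × (Int × Int × Int) × Int × Int × Int)) (chan_vids_w_term : List String) (stat_type : Int) : List String :=
  if stat_type = 0 then
    let keys := chan_vids_w_term.map (fun v => (pvDGet id_stats v).1)
    let thr := keys.foldl pvMaxD (0, 0, 0)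
    ((chan_vids_w_term.zip keys).filter (fun p => decide (p.2 = thr))).map Prod.fst
  else
    let keys := chan_vids_w_term.map (fun v => pvStatIdx (pvDGet id_stats v) stat_type)
    let thr := keys.foldl pvMaxI 0
    ((chan_vids_w_term.zip keys).filter (fun p => decide (p.2 = thr))).map Prod.fst

-- ===== PRECONDITION & SPEC =====
-- Pre_ = exactly where Python A returns: either no iteration happens, or every id is a key of the
-- dict (else KeyError) and stat_type is an index of the 4-tuple that is not the date slot
-- (|stat_type| ≥ 4 raises IndexError; stat_type = -4 selects the date and 'tuple > int' raises TypeError)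
def Pre_get_highest_stat_vids (id_stats : List (String × (Int × Int × Int) × Int × Int × Int)) (chan_vids_w_term : List String) (stat_type : Int) : Prop :=
  chan_vids_w_term = [] ∨
    ((∀ v ∈ chan_vids_w_term, v ∈ id_stats.map Prod.fst) ∧ -3 ≤ stat_type ∧ stat_type ≤ 3)
instance (id_stats : List (String × (Int × Int × Int) × Int × Int × Int)) (chan_vids_w_term : List String) (stat_type : Int) : Decidable (Pre_get_highest_stat_vids id_stats chan_vids_w_term stat_type) := by unfold Pre_get_highest_stat_vids; infer_instance

def pvWitness_get_highest_stat_vids : (List (String × (Int × Int × Int) × Int × Int × Int)) × List String × Int :=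
  ([("a", ((1, 2, 3), 5, 6, 7)), ("b", ((2, 0, 0), 5, 1, 1))], (["a", "b"], 1))

def Spec_get_highest_stat_vids (id_stats : List (String × (Int × Int × Int) × Int × Int × Int)) (chan_vids_w_term : List String) (stat_type : Int) (out : List String) : Prop := out = get_highest_stat_vids_alt id_stats chan_vids_w_term stat_type
instance (id_stats : List (String × (Int × Int × Int) × Int × Int × Int)) (chan_vids_w_term : List String) (stat_type : Int) (out : List String) : Decidable (Spec_get_highest_stat_vids id_stats chan_vids_w_term stat_type out) := by unfold Spec_get_highest_stat_vids; infer_instance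

-- ===== CLAIM (what is proved, stated in full; the proofs are below) =====
def Claim_equal_get_highest_stat_vids : Prop := ∀ (id_stats : List (String × (Int × Int × Int) × Int × Int × Int)) (chan_vids_w_term : List String) (stat_type : Int), Dom_get_highest_stat_vids id_stats chan_vids_w_term stat_type → Pre_get_highest_stat_vids id_stats chan_vids_w_term stat_type → Spec_get_highest_stat_vids id_stats chan_vids_w_term stat_type (get_highest_stat_vids id_stats chan_vids_w_term stat_type)

-- ===== LEMMAS AND PROOFS =====

-- generic "running max with reset" loop step and its max-then-filter characterisation
def mxF {K : Type} (lt : K → K → Bool) (a b : K) : K := if lt a b then b else a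

def stepG {K : Type} [DecidableEq K] (lt : K → K → Bool) (key : String → K) (s : List String × K) (v : String) : List String × K :=
  if lt s.2 (key v) then ([v], key v)
  else if key v = s.2 then (s.1 ++ [v], s.2)
  else s

lemma fmax_cases {K : Type} (lt : K → K → Bool) (key : String → K)
    (Htr : ∀ a b c, lt a b = true → lt b c = true → lt a c = true) :
    ∀ (l : List String) (m : K),
      l.foldl (fun m v => mxF lt m (key v)) m = m ∨ lt m (l.foldl (fun m v => mxF lt m (key v)) m) = true := by
  intro l
  induction l with
  | nil => intro m; left; rfl
  | cons v l ih =>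
    intro m
    simp only [List.foldl_cons]
    rcases ih (mxF lt m (key v)) with h | h <;> unfold mxF at * <;> split_ifs at * with hc
    · right; rw [h]; exact hc
    · left; exact h
    · right; exact Htr _ _ _ hc h
    · right; exact h

lemma loopG_eq {K : Type} [DecidableEq K] (lt : K → K → Bool) (key : String → K)
    (Htr : ∀ a b c, lt a b = true → lt b c = true → lt a c = true)
    (Hirr : ∀ a, lt a a = false) :
    ∀ (l : List String) (acc : List String) (m : K),
      (l.foldl (stepG lt key) (acc, m)).1 =
        (if l.foldl (fun m v => mxF lt m (key v)) m = m then acc else []) ++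
          l.filter (fun v => decide (key v = l.foldl (fun m v => mxF lt m (key v)) m)) := by
  intro l
  induction l with
  | nil => intro acc m; simp
  | cons v l ih =>
    intro acc m
    simp only [List.foldl_cons, List.filter_cons, decide_eq_true_eq]
    by_cases h1 : lt m (key v) = true
    · have hF : mxF lt m (key v) = key v := by unfold mxF; rw [if_pos h1]
      have hS : stepG lt key (acc, m) v = ([v], key v) := by unfold stepG; rw [if_pos h1]
      rw [hS, ih]; simp only [hF]
      have hMm : l.foldl (fun m v => mxF lt m (key v)) (key v) ≠ m := by
        intro hEq
        rcases fmax_cases lt key Htr l (key v) with h | h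
        · rw [hEq] at h; rw [h] at h1; rw [Hirr] at h1; exact absurd h1 (by simp)
        · rw [hEq] at h
          have := Htr _ _ _ h1 h
          rw [Hirr] at this; exact absurd this (by simp)
      rw [if_neg hMm]
      by_cases h2 : key v = l.foldl (fun m v => mxF lt m (key v)) (key v)
      · rw [if_pos h2.symm, if_pos h2]; simp
      · rw [if_neg (fun h => h2 h.symm), if_neg h2]
    · have hF : mxF lt m (key v) = m := by unfold mxF; rw [if_neg h1]
      by_cases h2 : key v = m
      · have hS : stepG lt key (acc, m) v = (acc ++ [v], m) := by
          unfold stepG; rw [if_neg h1, if_pos h2]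
        rw [hS, ih]; simp only [hF]
        by_cases h3 : l.foldl (fun m v => mxF lt m (key v)) m = m
        · rw [if_pos h3, if_pos h3, if_pos (by rw [h2, h3])]
          simp
        · have hne2 : ¬ (key v = l.foldl (fun m v => mxF lt m (key v)) m) := by
            intro hk; exact h3 (by rw [← hk, h2])
          rw [if_neg h3, if_neg h3, if_neg hne2]
      · have hS : stepG lt key (acc, m) v = (acc, m) := by
          unfold stepG; rw [if_neg h1, if_neg h2]
        rw [hS, ih]; simp only [hF]
        have hne : ¬ key v = l.foldl (fun m v => mxF lt m (key v)) m := by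
          intro hEq
          rcases fmax_cases lt key Htr l m with h | h
          · exact h2 (hEq.trans h)
          · rw [← hEq] at h; rw [h] at h1; exact h1 rfl
        rw [if_neg hne]

-- bridge: zip-with-keys filter = direct filter
lemma zip_filter_map {K : Type} [DecidableEq K] (key : String → K) (t : K) :
    ∀ l : List String,
      ((l.zip (l.map key)).filter (fun p => decide (p.2 = t))).map Prod.fst =
        l.filter (fun v => decide (key v = t)) := by
  intro l
  induction l with
  | nil => rfl
  | cons v l ih =>
    simp only [List.map_cons, List.zip_cons_cons, List.filter_cons]
    by_cases h : key v = t
    · simp [h, ih]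
    · simp [h, ih]

-- get_recent in terms of the raw comparison
lemma get_recent_t (nd cd : Int × Int × Int) : (get_recent nd cd = GetRecent.t) ↔ pvDateGt nd cd = true := by
  unfold get_recent
  by_cases h : pvDateGt nd cd = true
  · rw [if_pos h]; simp [h]
  · rw [if_neg h]
    by_cases h2 : nd = cd
    · rw [if_pos h2]; simp [h]
    · rw [if_neg h2]; simp [h]

lemma get_recent_both (nd cd : Int × Int × Int) (h : pvDateGt nd cd = false) :
    (get_recent nd cd = GetRecent.both) ↔ nd = cd := by
  unfold get_recent
  rw [if_neg (by rw [h]; simp)]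
  by_cases h2 : nd = cd
  · rw [if_pos h2]; simp [h2]
  · rw [if_neg h2]; simp [h2]

-- A's fold with stat_type ≠ 0 projects to the generic loop on the int key
lemma foldA_stat (id_stats : List (String × (Int × Int × Int) × Int × Int × Int)) (stat_type : Int)
    (hst : stat_type ≠ 0) :
    ∀ (l : List String) (acc : List String) (r : Int × Int × Int) (ms : Int),
      l.foldl (pvStepA id_stats stat_type) (acc, r, ms)
      = ((l.foldl (stepG (fun a b => decide (a < b)) (fun v => pvStatIdx (pvDGet id_stats v) stat_type)) (acc, ms)).1,
         r,
         (l.foldl (stepG (fun a b => decide (a < b)) (fun v => pvStatIdx (pvDGet id_stats v) stat_type)) (acc, ms)).2) := by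
  intro l
  induction l with
  | nil => intro acc r ms; rfl
  | cons v l ih =>
    intro acc r ms
    simp only [List.foldl_cons]
    have hst' : stat_type ≠ 1 - 1 := by omega
    by_cases h1 : ms < pvStatIdx (pvDGet id_stats v) stat_type
    · have hA : pvStepA id_stats stat_type (acc, r, ms) v = ([v], r, pvStatIdx (pvDGet id_stats v) stat_type) := by
        unfold pvStepA; rw [if_pos hst', if_pos h1]
      have hS : stepG (fun a b => decide (a < b)) (fun v => pvStatIdx (pvDGet id_stats v) stat_type) (acc, ms) v
          = ([v], pvStatIdx (pvDGet id_stats v) stat_type) := by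
        unfold stepG; rw [if_pos (by simpa using h1)]
      rw [hA, hS, ih]
    · by_cases h2 : pvStatIdx (pvDGet id_stats v) stat_type = ms
      · have hA : pvStepA id_stats stat_type (acc, r, ms) v = (acc ++ [v], r, ms) := by
          unfold pvStepA; rw [if_pos hst', if_neg h1, if_pos h2]
        have hS : stepG (fun a b => decide (a < b)) (fun v => pvStatIdx (pvDGet id_stats v) stat_type) (acc, ms) v
            = (acc ++ [v], ms) := by
          unfold stepG; rw [if_neg (by simpa using h1), if_pos h2]
        rw [hA, hS, ih]
      · have hA : pvStepA id_stats stat_type (acc, r, ms) v = (acc, r, ms) := by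
          unfold pvStepA; rw [if_pos hst', if_neg h1, if_neg h2]
        have hS : stepG (fun a b => decide (a < b)) (fun v => pvStatIdx (pvDGet id_stats v) stat_type) (acc, ms) v
            = (acc, ms) := by
          unfold stepG; rw [if_neg (by simpa using h1), if_neg h2]
        rw [hA, hS, ih]

-- A's fold with stat_type = 0 projects to the generic loop on the date key
lemma foldA_date (id_stats : List (String × (Int × Int × Int) × Int × Int × Int)) :
    ∀ (l : List String) (acc : List String) (r : Int × Int × Int) (ms : Int),
      l.foldl (pvStepA id_stats 0) (acc, r, ms)
      = ((l.foldl (stepG (fun a b => pvDateGt b a) (fun v => (pvDGet id_stats v).1)) (acc, r)).1,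
         (l.foldl (stepG (fun a b => pvDateGt b a) (fun v => (pvDGet id_stats v).1)) (acc, r)).2,
         ms) := by
  intro l
  induction l with
  | nil => intro acc r ms; rfl
  | cons v l ih =>
    intro acc r ms
    simp only [List.foldl_cons]
    have hst : ¬ ((0 : Int) ≠ 1 - 1) := by norm_num
    by_cases h1 : pvDateGt (pvDGet id_stats v).1 r = true
    · have hA : pvStepA id_stats 0 (acc, r, ms) v = ([v], (pvDGet id_stats v).1, ms) := by
        unfold pvStepA; rw [if_neg hst, if_pos ((get_recent_t _ _).mpr h1)]
      have hS : stepG (fun a b => pvDateGt b a) (fun v => (pvDGet id_stats v).1) (acc, r) v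
          = ([v], (pvDGet id_stats v).1) := by
        unfold stepG; rw [if_pos h1]
      rw [hA, hS, ih]
    · have h1' : pvDateGt (pvDGet id_stats v).1 r = false := by simpa using h1
      by_cases h2 : (pvDGet id_stats v).1 = r
      · have hA : pvStepA id_stats 0 (acc, r, ms) v = (acc ++ [v], r, ms) := by
          unfold pvStepA
          rw [if_neg hst, if_neg (by rw [get_recent_t]; simp [h1']),
            if_pos ((get_recent_both _ _ h1').mpr h2)]
        have hS : stepG (fun a b => pvDateGt b a) (fun v => (pvDGet id_stats v).1) (acc, r) v
            = (acc ++ [v], r) := by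
          unfold stepG; rw [if_neg (by simp [h1']), if_pos h2]
        rw [hA, hS, ih]
      · have hA : pvStepA id_stats 0 (acc, r, ms) v = (acc, r, ms) := by
          unfold pvStepA
          rw [if_neg hst, if_neg (by rw [get_recent_t]; simp [h1']),
            if_neg (by rw [get_recent_both _ _ h1']; exact h2)]
        have hS : stepG (fun a b => pvDateGt b a) (fun v => (pvDGet id_stats v).1) (acc, r) v
            = (acc, r) := by
          unfold stepG; rw [if_neg (by simp [h1']), if_neg h2]
        rw [hA, hS, ih]

-- comparison facts
lemma ltI_trans : ∀ a b c : Int, decide (a < b) = true → decide (b < c) = true → decide (a < c) = true := by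
  intro a b c h1 h2; simp at *; omega
lemma ltI_irr : ∀ a : Int, decide (a < a) = false := by intro a; simp
lemma ltD_trans : ∀ a b c : Int × Int × Int, pvDateGt b a = true → pvDateGt c b = true → pvDateGt c a = true := by
  rintro ⟨a1, a2, a3⟩ ⟨b1, b2, b3⟩ ⟨c1, c2, c3⟩ h1 h2
  simp [pvDateGt] at *; omega
lemma ltD_irr : ∀ a : Int × Int × Int, pvDateGt a a = false := by
  rintro ⟨a1, a2, a3⟩; simp [pvDateGt]

-- B's max folds agree with the generic mxF fold over the keys
lemma maxI_eq (key : String → Int) (l : List String) (m : Int) :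
    (l.map key).foldl pvMaxI m = l.foldl (fun m v => mxF (fun a b => decide (a < b)) m (key v)) m := by
  rw [List.foldl_map]
  congr 1
  funext a v
  unfold pvMaxI mxF
  by_cases h : a < key v
  · rw [if_pos h, if_pos (by simpa using h)]
  · rw [if_neg h, if_neg (by simpa using h)]

lemma maxD_eq (key : String → Int × Int × Int) (l : List String) (m : Int × Int × Int) :
    (l.map key).foldl pvMaxD m = l.foldl (fun m v => mxF (fun a b => pvDateGt b a) m (key v)) m := by
  rw [List.foldl_map]; rfl

-- ===== VERDICT (by name: the statement is the Claim_ definition above) =====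
theorem get_highest_stat_vids_spec : Claim_equal_get_highest_stat_vids := by
  intro id_stats chan stat_type _ _
  unfold Spec_get_highest_stat_vids get_highest_stat_vids get_highest_stat_vids_alt
  by_cases hst : stat_type = 0
  · subst hst
    rw [if_pos rfl, foldA_date id_stats chan [] (0, 0, 0) 0]
    simp only
    rw [zip_filter_map, maxD_eq, loopG_eq _ _ ltD_trans ltD_irr]
    simp [ite_self]
  · rw [if_neg hst, foldA_stat id_stats stat_type hst chan [] (0, 0, 0) 0]
    simp only
    rw [zip_filter_map, maxI_eq, loopG_eq _ _ ltI_trans ltI_irr]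
    simp [ite_self]
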